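-- pv_equiv track=rewrite | github.com/ezimmer9/pytorch_ops_perf | generate_code_from_json.py | count_tensors_in_sig
-- ===== SOURCE A (Python) =====
-- def count_tensors_in_sig(sig):
--     tensors_in_sig_all = 0
--     tensors_in_sig_optional=0
--     self_tensor_location = -1
--     tensor_num=-1
--     for i, ins in enumerate(sig):
--         if any('Tensor' in k for k in ins):
--             tensors_in_sig_all+=1
--             tensor_num+=1
--         if any('self' in k for k in ins):
--             self_tensor_location=tensor_num
--         if any('optional' in k for k in ins):
--             tensors_in_sig_optional+=1
--     tensors_in_sig_must=tensors_in_sig_all-tensors_in_sig_optional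
--     return tensors_in_sig_must, tensors_in_sig_all, self_tensor_location
-- ===== SOURCE B (Python) =====
-- def count_tensors_in_sig(sig):
--     all_t = sum(any('Tensor' in k for k in ins) for ins in sig)
--     opt = sum(any('optional' in k for k in ins) for ins in sig)
--     loc = -1
--     trailing = 0
--     for ins in reversed(sig):
--         if any('self' in k for k in ins):
--             loc = all_t - trailing - 1
--             break
--         if any('Tensor' in k for k in ins):
--             trailing += 1
--     return all_t - opt, all_t, loc
-- ===== Notes on version B (the rewrite author's own statement) =====
-- stated objective: alternative
-- what changed: Replaces A's single forward pass threading four mutable counters (including the trailing tensor_num accumulator) by flag sums plus a reverse scan that stops at the last 'self' entry, computing the location as all_tensors - tensors_after_last_self - 1.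
import Mathlib
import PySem

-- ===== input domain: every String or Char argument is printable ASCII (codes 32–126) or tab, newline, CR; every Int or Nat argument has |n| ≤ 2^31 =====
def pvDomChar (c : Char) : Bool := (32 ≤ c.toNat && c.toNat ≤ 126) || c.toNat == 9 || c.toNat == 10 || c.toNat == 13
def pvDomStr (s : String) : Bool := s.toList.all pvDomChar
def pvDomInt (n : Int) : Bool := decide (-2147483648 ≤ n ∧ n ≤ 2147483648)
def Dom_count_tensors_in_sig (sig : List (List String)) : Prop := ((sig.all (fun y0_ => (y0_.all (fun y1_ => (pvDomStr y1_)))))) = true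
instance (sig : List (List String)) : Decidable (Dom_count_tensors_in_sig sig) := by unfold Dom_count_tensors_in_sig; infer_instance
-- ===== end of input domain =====

-- ===== PORT A =====
-- B changes the algorithm (flag sums + reverse scan for the self location), not the result; same cost class.
def pvAnyTensor (ins : List String) : Bool := ins.any (fun k => PySem.Str.isIn "Tensor" k)
def pvAnySelf (ins : List String) : Bool := ins.any (fun k => PySem.Str.isIn "self" k)
def pvAnyOptional (ins : List String) : Bool := ins.any (fun k => PySem.Str.isIn "optional" k)

def pvStepA (st : Int × Int × Int × Int) (ins : List String) : Int × Int × Int × Int :=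
  let all := if pvAnyTensor ins then st.1 + 1 else st.1
  let tn := if pvAnyTensor ins then st.2.2.2 + 1 else st.2.2.2
  let loc := if pvAnySelf ins then tn else st.2.2.1
  let opt := if pvAnyOptional ins then st.2.1 + 1 else st.2.1
  (all, opt, loc, tn)

def count_tensors_in_sig (sig : List (List String)) : Int × Int × Int :=
  let st := sig.foldl pvStepA (0, 0, -1, -1)
  (st.1 - st.2.1, st.1, st.2.2.1)

-- ===== PORT B =====
-- reverse scan with break: counts tensor entries after the last 'self' entry
def pvLocB (allT : Int) (trailing : Int) : List (List String) → Int
  | [] => -1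
  | ins :: rest =>
      if pvAnySelf ins then allT - trailing - 1
      else pvLocB allT (if pvAnyTensor ins then trailing + 1 else trailing) rest

def count_tensors_in_sig_alt (sig : List (List String)) : Int × Int × Int :=
  let allT : Int := (sig.countP (fun ins => pvAnyTensor ins) : Int)
  let opt : Int := (sig.countP (fun ins => pvAnyOptional ins) : Int)
  let loc := pvLocB allT 0 sig.reverse
  (allT - opt, allT, loc)

-- ===== PRECONDITION & SPEC =====
def Spec_count_tensors_in_sig (sig : List (List String)) (out : Int × Int × Int) : Prop := out = count_tensors_in_sig_alt sig
instance (sig : List (List String)) (out : Int × Int × Int) : Decidable (Spec_count_tensors_in_sig sig out) := by unfold Spec_count_tensors_in_sig; infer_instance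

-- ===== CLAIM (what is proved, stated in full; the proofs are below) =====
def Claim_equal_count_tensors_in_sig : Prop := ∀ (sig : List (List String)), Dom_count_tensors_in_sig sig → Spec_count_tensors_in_sig sig (count_tensors_in_sig sig)

-- ===== LEMMAS AND PROOFS =====
def pvCT (l : List (List String)) : Int := (l.countP (fun ins => pvAnyTensor ins) : Int)

-- A's loop folded down to its self-location component only (proof device)
def pvG : List (List String) → Int → Int → Int
  | [], _, loc0 => loc0
  | x :: rest, a, loc0 =>
      let a' := if pvAnyTensor x then a + 1 else a
      pvG rest a' (if pvAnySelf x then a' - 1 else loc0)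

theorem pvStepA_eq (a o loc0 : Int) (x : List String) :
    pvStepA (a, o, loc0, a - 1) x
      = ((if pvAnyTensor x then a + 1 else a),
         (if pvAnyOptional x then o + 1 else o),
         (if pvAnySelf x then (if pvAnyTensor x then a + 1 else a) - 1 else loc0),
         (if pvAnyTensor x then a + 1 else a) - 1) := by
  cases htf : pvAnyTensor x <;> cases hsf : pvAnySelf x <;> cases hof : pvAnyOptional x <;>
    simp only [pvStepA, htf, hsf, hof, if_true] <;> norm_num

theorem pvFoldA_char (l : List (List String)) : ∀ (a o loc0 : Int),
    l.foldl pvStepA (a, o, loc0, a - 1)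
      = (a + pvCT l, o + (l.countP (fun ins => pvAnyOptional ins) : Int), pvG l a loc0, a + pvCT l - 1) := by
  induction l with
  | nil => intro a o loc0; simp [pvCT, pvG]
  | cons x l ih =>
      intro a o loc0
      by_cases htf : pvAnyTensor x <;> by_cases hsf : pvAnySelf x <;> by_cases hof : pvAnyOptional x <;>
        simp only [List.foldl_cons, pvStepA_eq, pvG, pvCT, List.countP_cons, htf, hsf, hof,
          if_true, if_false, Bool.false_eq_true, decide_true, decide_false] <;>
        (rw [ih]; simp only [Prod.mk.injEq, pvCT]; push_cast; and_intros <;> first | trivial | ring)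

theorem pvG_append (l : List (List String)) : ∀ (x : List String) (a loc0 : Int),
    pvG (l ++ [x]) a loc0
      = if pvAnySelf x then a + pvCT l + (if pvAnyTensor x then 1 else 0) - 1 else pvG l a loc0 := by
  induction l with
  | nil =>
      intro x a loc0
      simp only [List.nil_append, pvG, pvCT, List.countP_nil]
      split_ifs <;> omega
  | cons y l ih =>
      intro x a loc0
      simp only [List.cons_append, pvG]
      rw [ih]
      simp only [pvCT, List.countP_cons]
      by_cases hty : pvAnyTensor y <;> by_cases hsx : pvAnySelf x <;>
        simp [hty, hsx] <;> first | omega | (split_ifs <;> omega)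

theorem pvLocB_eq (l : List (List String)) : ∀ (a trailing : Int),
    pvLocB (a + pvCT l + trailing) trailing l.reverse = pvG l a (-1) := by
  induction l using List.reverseRecOn with
  | nil => intro a trailing; simp [pvLocB, pvCT, pvG]
  | append_singleton l x ih =>
      intro a trailing
      rw [List.reverse_append]
      simp only [List.reverse_singleton, List.singleton_append, pvLocB]
      rw [pvG_append]
      have hct : pvCT (l ++ [x]) = pvCT l + (if pvAnyTensor x then 1 else 0) := by
        simp [pvCT, List.countP_append, List.countP_cons]
      rw [hct]
      by_cases hs : pvAnySelf x <;> by_cases ht : pvAnyTensor x <;>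
          simp only [hs, ht, if_true, if_false, Bool.false_eq_true] <;>
          [skip; skip; skip; skip]
      · ring
      · ring
      · rw [show a + (pvCT l + 1) + trailing = a + pvCT l + (trailing + 1) by ring]
        exact ih a (trailing + 1)
      · rw [show a + (pvCT l + 0) + trailing = a + pvCT l + trailing by ring]
        exact ih a trailing

-- ===== VERDICT (by name: the statement is the Claim_ definition above) =====
theorem count_tensors_in_sig_spec : Claim_equal_count_tensors_in_sig := by
  intro sig _
  unfold Spec_count_tensors_in_sig count_tensors_in_sig count_tensors_in_sig_alt
  have hfold := pvFoldA_char sig 0 0 (-1)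
  norm_num at hfold
  have hloc := pvLocB_eq sig 0 0
  simp only [zero_add, add_zero, pvCT] at hloc
  simp only [hfold, pvCT, hloc]
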